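-- pv_equiv track=rewrite | github.com/WholeCoder/shannons-game | src/utils/coord_utils.py | get_tiny_matrix
-- ===== SOURCE A (Python) =====
-- def get_tiny_matrix(matrix, cell_size, shannon_speed):
--     sub_div = cell_size // shannon_speed
--     num_rows = len(matrix) * sub_div
--     num_cols = len(matrix[0]) * sub_div
--     tiny_matrix = [["null"] * num_cols for _ in range(num_rows)]
--     tiny_r, tiny_c = 0, 0
--     for row in matrix:
--         for cell in row:
--             if cell != "wall":
--                 cell = "null"
--             for sx in range(sub_div):
--                 for sy in range(sub_div):
--                     tiny_matrix[tiny_r + sx][tiny_c + sy] = cell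
--             tiny_c += sub_div
--         tiny_r += sub_div
--         tiny_c = 0
--     return tiny_matrix
-- ===== SOURCE B (Python) =====
-- def get_tiny_matrix(matrix, cell_size, shannon_speed):
--     sub_div = cell_size // shannon_speed
--     num_cols = len(matrix[0]) * sub_div
--     result = []
--     for row in matrix:
--         expanded = []
--         for cell in row:
--             expanded.extend([cell if cell == "wall" else "null"] * sub_div)
--         expanded.extend(["null"] * (num_cols - len(expanded)))
--         for _ in range(sub_div):
--             result.append(list(expanded))
--     return result
-- ===== Notes on version B (the rewrite author's own statement) =====
-- stated objective: alternative
-- what changed: B builds the tiny matrix row-by-row by expanding each source row into one padded expanded row and appending sub_div copies of it, instead of A's preallocating a null grid and scatter-writing every sub_div x sub_div block through index arithmetic.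
import Mathlib
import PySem

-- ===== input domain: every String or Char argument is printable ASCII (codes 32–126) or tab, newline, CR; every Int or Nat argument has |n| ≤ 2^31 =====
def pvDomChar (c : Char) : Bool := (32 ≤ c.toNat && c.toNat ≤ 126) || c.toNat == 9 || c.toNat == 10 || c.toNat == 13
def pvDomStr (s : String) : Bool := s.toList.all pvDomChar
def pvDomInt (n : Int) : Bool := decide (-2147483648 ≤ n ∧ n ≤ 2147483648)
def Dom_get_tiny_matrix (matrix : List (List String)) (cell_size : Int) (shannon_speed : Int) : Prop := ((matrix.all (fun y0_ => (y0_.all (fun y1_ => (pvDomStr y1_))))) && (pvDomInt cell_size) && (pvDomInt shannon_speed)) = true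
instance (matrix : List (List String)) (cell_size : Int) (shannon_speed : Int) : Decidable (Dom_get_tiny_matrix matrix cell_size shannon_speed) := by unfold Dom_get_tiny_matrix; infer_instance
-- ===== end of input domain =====

-- B builds the tiny matrix row-by-row (expand each source row, append sub_div copies)
-- instead of A's scatter-writes into a preallocated null grid; objective: alternative decomposition, same cost.

-- ===== PORT A =====
-- helper: the two innermost 'for sx/for sy' loops writing one sub_div×sub_div block.
-- 'tiny_matrix[i][j] = cell' is pySetD/pyGetD; under Pre_ every index is nonnegative and
-- in range, where pySetD/pyGetD are exactly Python's item assignment/read.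
def pvCellWrite (sub_div : Int) (cell : String) (tiny_r tiny_c : Int)
    (g : List (List String)) : List (List String) :=
  (PySem.List.pyRange 0 sub_div 1).foldl (fun g sx =>
    (PySem.List.pyRange 0 sub_div 1).foldl (fun g sy =>
      PySem.List.pySetD g (tiny_r + sx)
        (PySem.List.pySetD (PySem.List.pyGetD g (tiny_r + sx) []) (tiny_c + sy) cell)) g) g

-- helper: body of 'for cell in row' (state = (tiny_matrix, tiny_r, tiny_c))
def pvRowStep (sub_div : Int) (st : List (List String) × Int × Int) (cell : String) :
    List (List String) × Int × Int :=
  let cell := if cell ≠ "wall" then "null" else cell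
  (pvCellWrite sub_div cell st.2.1 st.2.2 st.1, st.2.1, st.2.2 + sub_div)

-- helper: body of 'for row in matrix'
def pvMatStep (sub_div : Int) (st : List (List String) × Int × Int) (row : List String) :
    List (List String) × Int × Int :=
  let st2 := row.foldl (pvRowStep sub_div) st
  (st2.1, st2.2.1 + sub_div, 0)

def get_tiny_matrix (matrix : List (List String)) (cell_size : Int) (shannon_speed : Int) :
    List (List String) :=
  let sub_div := PySem.Int.floordiv cell_size shannon_speed
  let num_rows := (matrix.length : Int) * sub_div
  let num_cols := ((PySem.List.pyGetD matrix 0 []).length : Int) * sub_div  -- matrix[0]: Pre_ gives matrix ≠ []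
  let tiny_matrix := List.replicate num_rows.toNat (List.replicate num_cols.toNat "null")
  (matrix.foldl (pvMatStep sub_div) (tiny_matrix, 0, 0)).1

-- ===== PORT B =====
def get_tiny_matrix_alt (matrix : List (List String)) (cell_size : Int) (shannon_speed : Int) :
    List (List String) :=
  let sub_div := PySem.Int.floordiv cell_size shannon_speed
  let num_cols := ((PySem.List.pyGetD matrix 0 []).length : Int) * sub_div
  matrix.foldl (fun result row =>
    let expanded := row.foldl (fun acc cell =>
      acc ++ List.replicate sub_div.toNat (if cell == "wall" then cell else "null")) []
    let expanded := expanded ++ List.replicate (num_cols - (expanded.length : Int)).toNat "null"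
    result ++ List.replicate sub_div.toNat expanded) []

-- ===== PRECONDITION & SPEC =====
-- Pre_ excludes exactly the inputs where A raises: empty matrix (IndexError on matrix[0]),
-- shannon_speed = 0 (ZeroDivisionError), and — when sub_div > 0, so that writes happen —
-- a row longer than the first row (IndexError writing past the preallocated width).
def Pre_get_tiny_matrix (matrix : List (List String)) (cell_size : Int) (shannon_speed : Int) : Prop :=
  matrix ≠ [] ∧ shannon_speed ≠ 0 ∧
    (PySem.Int.floordiv cell_size shannon_speed ≤ 0 ∨
      ∀ row ∈ matrix, row.length ≤ (matrix.headD []).length)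

instance (matrix : List (List String)) (cell_size : Int) (shannon_speed : Int) :
    Decidable (Pre_get_tiny_matrix matrix cell_size shannon_speed) := by
  unfold Pre_get_tiny_matrix; infer_instance

def pvWitness_get_tiny_matrix : List (List String) × Int × Int :=
  ([["wall", "x"], ["null", "wall"]], 4, 2)

def Spec_get_tiny_matrix (matrix : List (List String)) (cell_size : Int) (shannon_speed : Int)
    (out : List (List String)) : Prop := out = get_tiny_matrix_alt matrix cell_size shannon_speed
instance (matrix : List (List String)) (cell_size : Int) (shannon_speed : Int)
    (out : List (List String)) : Decidable (Spec_get_tiny_matrix matrix cell_size shannon_speed out) := by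
  unfold Spec_get_tiny_matrix; infer_instance

-- ===== CLAIM (what is proved, stated in full; the proofs are below) =====
def Claim_equal_get_tiny_matrix : Prop := ∀ (matrix : List (List String)) (cell_size : Int) (shannon_speed : Int), Dom_get_tiny_matrix matrix cell_size shannon_speed → Pre_get_tiny_matrix matrix cell_size shannon_speed → Spec_get_tiny_matrix matrix cell_size shannon_speed (get_tiny_matrix matrix cell_size shannon_speed)

-- ===== LEMMAS AND PROOFS =====

-- the common cell transform / expanded row (proof-side vocabulary)
def pvXf (cell : String) : String := if cell == "wall" then cell else "null"
def pvExpRow (sN c0 : Nat) (row : List String) : List String :=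
  row.flatMap (fun cell => List.replicate sN (pvXf cell)) ++
    List.replicate (c0 * sN - row.length * sN) "null"

theorem pvXf_eq (cell : String) : (if cell ≠ "wall" then "null" else cell) = pvXf cell := by
  by_cases h : cell = "wall" <;> simp [pvXf, h]

-- s ≤ 0: A's loops write nothing
theorem pvA_nonpos (s : Int) (hs : s ≤ 0) (rows : List (List String))
    (st : List (List String) × Int × Int) :
    (rows.foldl (pvMatStep s) st).1 = st.1 := by
  induction rows generalizing st with
  | nil => rfl
  | cons r rs ih =>
      simp only [List.foldl_cons, ih]
      show (r.foldl (pvRowStep s) st).1 = st.1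
      induction r generalizing st with
      | nil => rfl
      | cons c cs ih2 =>
          simp only [List.foldl_cons, ih2]
          simp [pvRowStep, pvCellWrite, PySem.List.pyRange_one_eq_nil hs]

theorem pvB_nonpos (s : Int) (hs : s ≤ 0) (rows : List (List String))
    (g : List String → List String) (acc : List (List String)) :
    rows.foldl (fun res row => res ++ List.replicate s.toNat (g row)) acc = acc := by
  induction rows generalizing acc with
  | nil => rfl
  | cons r rs ih =>
      have h0 : acc ++ List.replicate s.toNat (g r) = acc := by
        simp [Int.toNat_of_nonpos hs]
      rw [List.foldl_cons, h0]
      exact ih _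

-- a fold that reads and writes only row i of the grid acts on that row alone
theorem pvRowLocal (l : List Int) (h : List String → Int → List String)
    (gpre gpost : List (List String)) (row : List String) :
    l.foldl (fun g sy =>
        PySem.List.pySetD g ((gpre.length : Int))
          (h (PySem.List.pyGetD g ((gpre.length : Int)) []) sy))
      (gpre ++ row :: gpost)
    = gpre ++ (l.foldl h row) :: gpost := by
  induction l generalizing row with
  | nil => rfl
  | cons sy l ih =>
      simp only [List.foldl_cons]
      rw [show PySem.List.pyGetD (gpre ++ row :: gpost) ((gpre.length : Int)) [] = row by
            simp [PySem.List.pyGetD_natCast],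
          show PySem.List.pySetD (gpre ++ row :: gpost) ((gpre.length : Int)) (h row sy)
              = gpre ++ (h row sy) :: gpost by
            simp [PySem.List.pySetD_natCast]]
      exact ih (h row sy)

-- the inner 'for sy' loop fills columns c .. c+b-1 of one row
theorem pvRowSetI (v : String) : ∀ (mid : List String) (a b : Int) (pre post : List String)
    (c : Int), c + a = (pre.length : Int) → mid.length = (b - a).toNat →
    (PySem.List.pyRange a b 1).foldl (fun row sy => PySem.List.pySetD row (c + sy) v)
      (pre ++ (mid ++ post))
    = pre ++ (List.replicate mid.length v ++ post) := by
  intro mid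
  induction mid with
  | nil =>
      intro a b pre post c _ hm
      rw [List.length_nil] at hm
      rw [PySem.List.pyRange_one_eq_nil (by omega)]
      rfl
  | cons x mid ih =>
      intro a b pre post c hc hm
      rw [List.length_cons] at hm
      have hab : a < b := by omega
      rw [PySem.List.pyRange_one_cons hab, List.foldl_cons]
      have hidx : c + a = ((pre.length : Nat) : Int) := hc
      rw [hidx, PySem.List.pySetD_natCast]
      have hset : (pre ++ (x :: mid ++ post)).set pre.length v
          = (pre ++ [v]) ++ (mid ++ post) := by
        simp [List.set_append_right]
      rw [hset]
      rw [ih (a + 1) b (pre ++ [v]) post c (by simp [List.length_append]; omega)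
            (by omega)]
      simp [List.replicate_succ, List.append_assoc, List.length_cons]

-- the 'for sx' loop: apply one row-local operation to each of the block's rows
theorem pvBlockSetI (l : List Int) (h : List String → Int → List String) (e e' : List String)
    (hrow : l.foldl h e = e') :
    ∀ (n : Nat) (a b : Int) (gpre gpost : List (List String)) (r : Int),
    r + a = (gpre.length : Int) → n = (b - a).toNat →
    (PySem.List.pyRange a b 1).foldl (fun g sx =>
        l.foldl (fun g sy =>
          PySem.List.pySetD g (r + sx) (h (PySem.List.pyGetD g (r + sx) []) sy)) g)
      (gpre ++ (List.replicate n e ++ gpost))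
    = gpre ++ (List.replicate n e' ++ gpost) := by
  intro n
  induction n with
  | zero =>
      intro a b gpre gpost r _ hn
      rw [PySem.List.pyRange_one_eq_nil (by omega)]
      rfl
  | succ n ih =>
      intro a b gpre gpost r hr hn
      have hab : a < b := by omega
      rw [PySem.List.pyRange_one_cons hab, List.foldl_cons]
      have h0 : gpre ++ (List.replicate (n + 1) e ++ gpost)
          = gpre ++ e :: (List.replicate n e ++ gpost) := by
        simp [List.replicate_succ]
      have hidx : r + a = ((gpre.length : Nat) : Int) := hr
      rw [h0, hidx, pvRowLocal l h gpre (List.replicate n e ++ gpost) e, hrow]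
      rw [show gpre ++ e' :: (List.replicate n e ++ gpost)
            = (gpre ++ [e']) ++ (List.replicate n e ++ gpost) by simp]
      rw [ih (a + 1) b (gpre ++ [e']) gpost r (by simp; omega) (by omega)]
      simp [List.replicate_succ]

-- one cell: pvCellWrite fills an s×s block of 'null'-tails
theorem pvCellLemma (sN : Nat) (v : String) (gpre gpost : List (List String))
    (acc : List String) (K : Nat) (hK : sN ≤ K) :
    pvCellWrite (sN : Int) v ((gpre.length : Int)) ((acc.length : Int))
      (gpre ++ (List.replicate sN (acc ++ List.replicate K "null") ++ gpost))
    = gpre ++ (List.replicate sN ((acc ++ List.replicate sN v) ++ List.replicate (K - sN) "null") ++ gpost) := by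
  have hsplit : acc ++ List.replicate K "null"
      = acc ++ (List.replicate sN "null" ++ List.replicate (K - sN) "null") := by
    rw [← List.replicate_add, Nat.add_sub_cancel' hK]
  have hrow : (PySem.List.pyRange 0 (sN : Int) 1).foldl
        (fun row sy => PySem.List.pySetD row ((acc.length : Int) + sy) v)
        (acc ++ List.replicate K "null")
      = (acc ++ List.replicate sN v) ++ List.replicate (K - sN) "null" := by
    rw [hsplit,
        pvRowSetI v (List.replicate sN "null") 0 (sN : Int) acc
          (List.replicate (K - sN) "null") ((acc.length : Int)) (by simp) (by simp)]
    simp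
  unfold pvCellWrite
  exact pvBlockSetI (PySem.List.pyRange 0 (sN : Int) 1)
    (fun row sy => PySem.List.pySetD row ((acc.length : Int) + sy) v)
    (acc ++ List.replicate K "null")
    ((acc ++ List.replicate sN v) ++ List.replicate (K - sN) "null") hrow
    sN 0 (sN : Int) gpre gpost ((gpre.length : Int)) (by simp) (by omega)

-- the 'for cell in row' loop
theorem pvRowLemma (sN : Nat) (gpre gpost : List (List String)) :
    ∀ (cs : List String) (acc : List String) (K : Nat), cs.length * sN ≤ K →
    cs.foldl (pvRowStep (sN : Int))
      (gpre ++ (List.replicate sN (acc ++ List.replicate K "null") ++ gpost),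
        (gpre.length : Int), (acc.length : Int))
    = (gpre ++ (List.replicate sN
          ((acc ++ cs.flatMap (fun cell => List.replicate sN (pvXf cell)))
            ++ List.replicate (K - cs.length * sN) "null") ++ gpost),
        (gpre.length : Int), ((acc.length : Int) + (cs.length * sN : Nat))) := by
  intro cs
  induction cs with
  | nil => intro acc K _; simp
  | cons c cs ih =>
      intro acc K hK
      rw [List.foldl_cons]
      have hsN : sN ≤ K := by
        have : (c :: cs).length * sN = sN + cs.length * sN := by
          simp [List.length_cons]; ring
        omega
      show cs.foldl (pvRowStep (sN : Int))
          (pvCellWrite (sN : Int) (if c ≠ "wall" then "null" else c)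
              ((gpre.length : Int)) ((acc.length : Int))
              (gpre ++ (List.replicate sN (acc ++ List.replicate K "null") ++ gpost)),
            (gpre.length : Int), (acc.length : Int) + (sN : Int)) = _
      rw [pvXf_eq c, pvCellLemma sN (pvXf c) gpre gpost acc K hsN]
      have hacc : ((acc.length : Int) + (sN : Int))
          = (((acc ++ List.replicate sN (pvXf c)).length : Nat) : Int) := by
        simp
      rw [hacc]
      rw [ih (acc ++ List.replicate sN (pvXf c)) (K - sN)
            (by have : (c :: cs).length * sN = sN + cs.length * sN := by
                  simp [List.length_cons]; ring
                omega)]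
      have harith : K - sN - cs.length * sN = K - (c :: cs).length * sN := by
        have : (c :: cs).length * sN = sN + cs.length * sN := by
          simp [List.length_cons]; ring
        omega
      have hflat : acc ++ List.replicate sN (pvXf c)
            ++ cs.flatMap (fun cell => List.replicate sN (pvXf cell))
          = acc ++ (c :: cs).flatMap (fun cell => List.replicate sN (pvXf cell)) := by
        simp [List.flatMap_cons, List.append_assoc]
      rw [harith, hflat]
      simp only [Prod.mk.injEq]
      refine ⟨trivial, trivial, ?_⟩
      simp only [List.length_append, List.length_replicate, List.length_cons]
      push_cast; ring

-- the 'for row in matrix' loop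
theorem pvOuterLemma (sN c0 : Nat) :
    ∀ (rows : List (List String)) (done : List (List String)),
    (∀ row ∈ rows, row.length ≤ c0) →
    (rows.foldl (pvMatStep (sN : Int))
      (done ++ List.replicate (rows.length * sN) (List.replicate (c0 * sN) "null"),
        (done.length : Int), 0)).1
    = done ++ rows.flatMap (fun row => List.replicate sN (pvExpRow sN c0 row)) := by
  intro rows
  induction rows with
  | nil => intro done _; simp
  | cons row rest ih =>
      intro done hlen
      rw [List.foldl_cons]
      have hsplit : List.replicate ((row :: rest).length * sN) (List.replicate (c0 * sN) "null")
          = List.replicate sN (List.replicate (c0 * sN) "null")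
            ++ List.replicate (rest.length * sN) (List.replicate (c0 * sN) "null") := by
        rw [← List.replicate_add]; congr 1; simp [List.length_cons]; ring
      rw [hsplit]
      have hrow := pvRowLemma sN done
        (List.replicate (rest.length * sN) (List.replicate (c0 * sN) "null"))
        row [] (c0 * sN)
        (by have := hlen row (by simp); exact Nat.mul_le_mul_right sN this)
      simp only [List.nil_append, List.length_nil, Nat.cast_zero] at hrow
      show (rest.foldl (pvMatStep (sN : Int))
          ((row.foldl (pvRowStep (sN : Int)) _).1,
            (row.foldl (pvRowStep (sN : Int)) _).2.1 + (sN : Int), 0)).1 = _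
      rw [hrow]
      dsimp only
      have hdone : ((done.length : Int) + (sN : Int))
          = (((done ++ List.replicate sN (pvExpRow sN c0 row)).length : Nat) : Int) := by
        simp
      have hexp : row.flatMap (fun cell => List.replicate sN (pvXf cell))
            ++ List.replicate (c0 * sN - row.length * sN) "null" = pvExpRow sN c0 row := by
        simp [pvExpRow]
      rw [hexp, hdone]
      have := ih (done ++ List.replicate sN (pvExpRow sN c0 row))
        (fun r hr => hlen r (by simp [hr]))
      rw [List.append_assoc] at this
      rw [this]
      simp [List.flatMap_cons]

-- s ≤ 0 helpers for the final assembly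
theorem pvA_empty (matrix : List (List String)) (cs ss : Int)
    (hs : PySem.Int.floordiv cs ss ≤ 0) : get_tiny_matrix matrix cs ss = [] := by
  unfold get_tiny_matrix
  dsimp only
  rw [pvA_nonpos _ hs]
  have h1 : ((matrix.length : Int) * PySem.Int.floordiv cs ss).toNat = 0 := by
    have := mul_nonpos_of_nonneg_of_nonpos (a := (matrix.length : Int))
      (Int.natCast_nonneg _) hs
    omega
  rw [h1, List.replicate_zero]

theorem pvB_empty (matrix : List (List String)) (cs ss : Int)
    (hs : PySem.Int.floordiv cs ss ≤ 0) : get_tiny_matrix_alt matrix cs ss = [] := by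
  unfold get_tiny_matrix_alt
  dsimp only
  exact pvB_nonpos _ hs matrix _ []

-- final assembly
theorem get_tiny_matrix_spec : Claim_equal_get_tiny_matrix := by
  intro matrix cell_size shannon_speed _ hpre
  obtain ⟨hne, hss, hcase⟩ := hpre
  unfold Spec_get_tiny_matrix
  by_cases hs : PySem.Int.floordiv cell_size shannon_speed ≤ 0
  · rw [pvA_empty matrix cell_size shannon_speed hs, pvB_empty matrix cell_size shannon_speed hs]
  · obtain ⟨h, t, rfl⟩ : ∃ h t, matrix = h :: t := by
      cases matrix with
      | nil => exact absurd rfl hne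
      | cons h t => exact ⟨h, t, rfl⟩
    have hlen : ∀ row ∈ h :: t, row.length ≤ h.length := by
      have := hcase.resolve_left hs
      simpa using this
    set s := PySem.Int.floordiv cell_size shannon_speed with hsdef
    set sN := s.toNat with hsNdef
    have hsN : (sN : Int) = s := Int.toNat_of_nonneg (by omega)
    have hcast : ∀ n : Nat, ((n : Int) * s).toNat = n * sN := by
      intro n
      rw [← hsN, ← Nat.cast_mul, Int.toNat_natCast]
    -- A's side
    have hA : get_tiny_matrix (h :: t) cell_size shannon_speed
        = (h :: t).flatMap (fun row => List.replicate sN (pvExpRow sN h.length row)) := by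
      unfold get_tiny_matrix
      dsimp only
      rw [← hsdef, PySem.List.pyGetD_zero_cons, hcast, hcast, ← hsN]
      have := pvOuterLemma sN h.length (h :: t) [] hlen
      simpa using this
    -- B's side
    have hB : get_tiny_matrix_alt (h :: t) cell_size shannon_speed
        = (h :: t).flatMap (fun row => List.replicate sN (pvExpRow sN h.length row)) := by
      unfold get_tiny_matrix_alt
      dsimp only
      rw [← hsdef, PySem.List.pyGetD_zero_cons,
          PySem.List.foldl_append_eq_flatMap, List.nil_append]
      have hfun : ∀ row : List String,
          row.foldl (fun acc cell =>
              acc ++ List.replicate sN (if cell == "wall" then cell else "null")) []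
            ++ List.replicate
                (((h.length : Int) * s) - ((row.foldl (fun acc cell =>
                  acc ++ List.replicate sN (if cell == "wall" then cell else "null")) []).length : Int)).toNat
                "null"
          = pvExpRow sN h.length row := by
        intro row
        rw [PySem.List.foldl_append_eq_flatMap, List.nil_append]
        have hlenf : (row.flatMap (fun cell =>
            List.replicate sN (if cell == "wall" then cell else "null"))).length
            = row.length * sN := by
          simp [List.length_flatMap, List.map_const', List.sum_replicate, smul_eq_mul]
        rw [hlenf]
        have hpad : (((h.length : Int) * s) - ((row.length * sN : Nat) : Int)).toNat
            = h.length * sN - row.length * sN := by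
          rw [← hsN, ← Nat.cast_mul]
          omega
        rw [hpad]
        unfold pvExpRow pvXf
        rfl
      simp only [← hsNdef]
      simp only [hfun]
    rw [hA, hB]
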